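-- pv_equiv track=rewrite | github.com/moketchups/BoundedSystemsTheory | _archive/routing_rebuild_20260120/demerzel_state_BACKUP_20260114_164121.py | _parse_laws
-- ===== SOURCE A (Python) =====
-- from typing import List, Dict, Optional
--
-- def _parse_laws(content: str) -> List[str]:
--     """Parse Robot Laws from markdown content"""
--     laws = []
--     lines = content.split('\n')
--     current_law = []
--
--     for line in lines:
--         if line.strip().startswith(('First Law', 'Second Law', 'Third Law', 'Zeroth Law')):
--             if current_law:
--                 laws.append(' '.join(current_law).strip())
--             current_law = [line.strip()]
--         elif current_law and line.strip():
--             current_law.append(line.strip())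
--
--     if current_law:
--         laws.append(' '.join(current_law).strip())
--
--     return laws if laws else [content[:500]]
-- ===== SOURCE B (Python) =====
-- from typing import List
--
-- def _parse_laws(content: str) -> List[str]:
--     """Parse Robot Laws: drop the prefix before the first header, then consume
--     header-delimited blocks one at a time (boundary-slicing decomposition)."""
--     HEADERS = ('First Law', 'Second Law', 'Third Law', 'Zeroth Law')
--     lines = [l.strip() for l in content.split('\n')]
--     while lines and not lines[0].startswith(HEADERS):
--         lines.pop(0)
--     laws = []
--     while lines:
--         block = [lines.pop(0)]
--         while lines and not lines[0].startswith(HEADERS):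
--             block.append(lines.pop(0))
--         laws.append(' '.join(s for s in block if s).strip())
--     return laws if laws else [content[:500]]
-- ===== Notes on version B (the rewrite author's own statement) =====
-- stated objective: alternative
-- what changed: A threads a (laws, current_law) accumulator through a single pass; B first drops the prefix before the first header, then repeatedly consumes one header-delimited block at a time (boundary-slicing decomposition) and joins each block's non-blank stripped lines.
import Mathlib
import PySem

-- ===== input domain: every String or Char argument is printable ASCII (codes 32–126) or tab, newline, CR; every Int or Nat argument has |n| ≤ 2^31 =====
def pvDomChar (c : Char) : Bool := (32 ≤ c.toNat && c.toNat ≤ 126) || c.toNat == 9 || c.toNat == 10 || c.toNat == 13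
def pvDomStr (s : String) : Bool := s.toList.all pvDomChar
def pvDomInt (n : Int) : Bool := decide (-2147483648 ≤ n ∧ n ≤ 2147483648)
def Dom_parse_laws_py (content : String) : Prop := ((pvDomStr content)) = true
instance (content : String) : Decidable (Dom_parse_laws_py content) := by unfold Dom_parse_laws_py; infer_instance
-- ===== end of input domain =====

-- B replaces A's single-pass (laws, current_law) accumulator with a "drop prefix,
-- then consume one header-delimited block at a time" decomposition; return values agree everywhere.

-- shared small helpers (the same startswith-tuple test and join-strip both Pythons write inline)
def pvHdr (s : String) : Bool :=
  PySem.Str.startswith s "First Law" || PySem.Str.startswith s "Second Law" ||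
  PySem.Str.startswith s "Third Law" || PySem.Str.startswith s "Zeroth Law"

def pvFinish (l : List String) : String := PySem.Str.strip (PySem.Str.join " " l)

-- ===== PORT A =====
def pvStepA (st : List String × List String) (line : String) : List String × List String :=
  let s := PySem.Str.strip line
  if pvHdr s then
    (st.1 ++ (if st.2 = [] then [] else [pvFinish st.2]), [s])
  else if st.2 ≠ [] ∧ s ≠ "" then
    (st.1, st.2 ++ [s])
  else st

def parse_laws_py (content : String) : List String :=
  let lines := (PySem.Str.split? content "\n").getD []
  let st := lines.foldl pvStepA ([], [])
  let laws := st.1 ++ (if st.2 = [] then [] else [pvFinish st.2])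
  if laws = [] then [PySem.Str.slice content none (some 500)] else laws

-- ===== PORT B =====
-- the inner while loops of Source B: consume one block (header + lines up to the next header), recurse
def pvGoB : List String → List String
  | [] => []
  | h :: t =>
    pvFinish ((h :: t.takeWhile (fun s => !pvHdr s)).filter (· ≠ "")) ::
    pvGoB (t.dropWhile (fun s => !pvHdr s))
  termination_by l => l.length
  decreasing_by
    simpa using Nat.lt_succ_of_le (List.length_dropWhile_le _ _)

def parse_laws_py_alt (content : String) : List String :=
  let lines := ((PySem.Str.split? content "\n").getD []).map PySem.Str.strip
  let laws := pvGoB (lines.dropWhile (fun s => !pvHdr s))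
  if laws = [] then [PySem.Str.slice content none (some 500)] else laws

-- ===== PRECONDITION & SPEC =====
def Spec_parse_laws_py (content : String) (out : List String) : Prop := out = parse_laws_py_alt content
instance (content : String) (out : List String) : Decidable (Spec_parse_laws_py content out) := by unfold Spec_parse_laws_py; infer_instance

-- ===== CLAIM (what is proved, stated in full; the proofs are below) =====
def Claim_equal_parse_laws_py : Prop := ∀ (content : String), Dom_parse_laws_py content → Spec_parse_laws_py content (parse_laws_py content)

-- ===== LEMMAS AND PROOFS =====

lemma pvHdr_ne_empty {s : String} (h : pvHdr s = true) : s ≠ "" := by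
  intro he; rw [he] at h; exact absurd h (by decide)

lemma pvGoB_cons (h : String) (t : List String) :
    pvGoB (h :: t) =
      pvFinish ((h :: t.takeWhile (fun s => !pvHdr s)).filter (· ≠ "")) ::
      pvGoB (t.dropWhile (fun s => !pvHdr s)) := by
  rw [pvGoB]

lemma pv_main (ls laws cur : List String) :
    (ls.foldl pvStepA (laws, cur)).1 ++
      (if (ls.foldl pvStepA (laws, cur)).2 = [] then [] else [pvFinish (ls.foldl pvStepA (laws, cur)).2])
    = laws ++
      (if cur = [] then pvGoB ((ls.map PySem.Str.strip).dropWhile (fun s => !pvHdr s))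
       else pvFinish (cur ++ ((ls.map PySem.Str.strip).takeWhile (fun s => !pvHdr s)).filter (· ≠ "")) ::
            pvGoB ((ls.map PySem.Str.strip).dropWhile (fun s => !pvHdr s))) := by
  induction ls generalizing laws cur with
  | nil =>
    simp only [List.foldl_nil, List.map_nil, List.takeWhile_nil, List.dropWhile_nil, pvGoB]
    by_cases hc : cur = [] <;> simp [hc]
  | cons line rest ih =>
    simp only [List.foldl_cons, List.map_cons, pvStepA]
    set s := PySem.Str.strip line with hs
    set m := rest.map PySem.Str.strip with hm
    by_cases hh : pvHdr s = true
    · have hne : s ≠ "" := pvHdr_ne_empty hh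
      rw [if_pos hh, ih]
      have htw : (s :: m).takeWhile (fun s => !pvHdr s) = [] := by
        simp [hh]
      have hdw : (s :: m).dropWhile (fun s => !pvHdr s) = s :: m := by
        simp [hh]
      have hgo : pvGoB ((s :: m).dropWhile (fun s => !pvHdr s)) =
          pvFinish (s :: (m.takeWhile (fun s => !pvHdr s)).filter (· ≠ "")) ::
          pvGoB (m.dropWhile (fun s => !pvHdr s)) := by
        rw [hdw, pvGoB_cons]
        simp [hne]
      have h1 : ([s] : List String) ≠ [] := by simp
      by_cases hc : cur = []
      · simp only [hc, if_neg h1, hgo]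
        simp only [reduceIte, List.append_nil, List.singleton_append]
      · simp only [if_neg hc, if_neg h1, htw, hgo]
        simp only [List.filter_nil, List.append_nil, List.append_assoc, List.cons_append,
          List.nil_append]
    · have hh' : pvHdr s = false := by simpa using hh
      rw [if_neg (by simp [hh'])]
      have hdw : (s :: m).dropWhile (fun s => !pvHdr s) = m.dropWhile (fun s => !pvHdr s) := by
        simp [hh']
      have htw : (s :: m).takeWhile (fun s => !pvHdr s) = s :: m.takeWhile (fun s => !pvHdr s) := by
        simp [hh']
      by_cases hc : cur = []
      · rw [if_neg (by simp [hc]), ih]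
        simp [hc, hdw]
      · by_cases hb : s = ""
        · rw [if_neg (by simp [hb]), ih]
          simp only [if_neg hc, hdw, htw]
          simp [hb]
        · rw [if_pos ⟨hc, hb⟩, ih]
          have hnn : cur ++ [s] ≠ [] := by simp
          simp only [if_neg hnn, if_neg hc, hdw, htw]
          simp [hb]

-- ===== VERDICT (by name: the statement is the Claim_ definition above) =====
theorem parse_laws_py_spec : Claim_equal_parse_laws_py := by
  intro content _
  unfold Spec_parse_laws_py parse_laws_py parse_laws_py_alt
  have h := pv_main ((PySem.Str.split? content "\n").getD []) [] []
  simp only [List.nil_append, reduceIte] at h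
  show (let laws := (List.foldl pvStepA ([], []) ((PySem.Str.split? content "\n").getD [])).1 ++
          (if (List.foldl pvStepA ([], []) ((PySem.Str.split? content "\n").getD [])).2 = [] then []
           else [pvFinish (List.foldl pvStepA ([], []) ((PySem.Str.split? content "\n").getD [])).2]);
        if laws = [] then [PySem.Str.slice content none (some 500)] else laws)
      = (let laws := pvGoB (List.dropWhile (fun s => !pvHdr s)
            (List.map PySem.Str.strip ((PySem.Str.split? content "\n").getD [])));
         if laws = [] then [PySem.Str.slice content none (some 500)] else laws)
  rw [h]
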